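-- pv_equiv track=rewrite | github.com/HSZemi/mccommands | 1.8/makeIronFarm_18.py | sub_build_redstone_blocks
-- ===== SOURCE A (Python) =====
-- def sub_build_redstone_blocks(commands):
-- 	if(len(commands) > 0):
-- 		commands.pop()
-- 		string = 'Block:"redstone_block",Time:1,Riding:{id: FallingSand,'
-- 		string += sub_build_redstone_blocks(commands)
-- 		string += '}'
-- 		return string
-- 	else:
-- 		return 'Block:"air",Time:1'
-- ===== SOURCE B (Python) =====
-- def sub_build_redstone_blocks(commands):
-- 	n = len(commands)
-- 	commands.clear()  # same side effect as A, which pops every element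
-- 	return ('Block:"redstone_block",Time:1,Riding:{id: FallingSand,' * n
-- 	        + 'Block:"air",Time:1'
-- 	        + '}' * n)
-- ===== Notes on version B (the rewrite author's own statement) =====
-- stated objective: faster
-- what changed: Replaced the self-recursion with a closed form: string repetition prefix*n + base + '}'*n where n = len(commands), clearing the list once for the same side effect.
import Mathlib
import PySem

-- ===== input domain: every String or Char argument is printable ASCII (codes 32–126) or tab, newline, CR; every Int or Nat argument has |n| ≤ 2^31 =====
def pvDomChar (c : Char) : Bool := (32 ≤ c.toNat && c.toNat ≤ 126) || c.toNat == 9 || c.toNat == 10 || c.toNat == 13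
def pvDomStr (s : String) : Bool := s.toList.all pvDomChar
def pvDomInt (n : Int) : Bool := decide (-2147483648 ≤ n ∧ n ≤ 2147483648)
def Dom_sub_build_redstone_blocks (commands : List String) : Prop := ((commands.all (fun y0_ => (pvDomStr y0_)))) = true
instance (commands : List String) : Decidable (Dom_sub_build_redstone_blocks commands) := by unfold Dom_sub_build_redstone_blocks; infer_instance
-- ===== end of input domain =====

-- B replaces the self-recursion by the closed form prefix*n + base + '}'*n (simpler);
-- both Pythons empty `commands` in place (A pops each element, B clears once) — the
-- theorems here are about the return value only.

-- ===== PORT A =====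
-- A recurses after popping the last element; only the length matters to the result.
def sub_build_redstone_blocks (commands : List String) : String :=
  if commands.length > 0 then
    -- commands.pop() removes the last element; the recursion continues on the rest
    let rest := commands.dropLast
    "Block:\"redstone_block\",Time:1,Riding:{id: FallingSand," ++
      sub_build_redstone_blocks rest ++ "}"
  else
    "Block:\"air\",Time:1"
termination_by commands.length
decreasing_by
  simp [List.length_dropLast]; omega

-- ===== PORT B =====
-- 'prefix' * n as in Source B
def pvRepeatStr (n : Nat) (s : String) : String :=
  match n with
  | 0 => ""
  | n + 1 => s ++ pvRepeatStr n s

def sub_build_redstone_blocks_alt (commands : List String) : String :=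
  let n := commands.length
  pvRepeatStr n "Block:\"redstone_block\",Time:1,Riding:{id: FallingSand," ++
    "Block:\"air\",Time:1" ++ pvRepeatStr n "}"

-- ===== PRECONDITION & SPEC =====
def Spec_sub_build_redstone_blocks (commands : List String) (out : String) : Prop := out = sub_build_redstone_blocks_alt commands
instance (commands : List String) (out : String) : Decidable (Spec_sub_build_redstone_blocks commands out) := by unfold Spec_sub_build_redstone_blocks; infer_instance

-- ===== CLAIM (what is proved, stated in full; the proofs are below) =====
def Claim_equal_sub_build_redstone_blocks : Prop := ∀ (commands : List String), Dom_sub_build_redstone_blocks commands → Spec_sub_build_redstone_blocks commands (sub_build_redstone_blocks commands)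

-- ===== LEMMAS AND PROOFS =====
theorem pvRepeatStr_comm (n : Nat) (s : String) :
    pvRepeatStr n s ++ s = s ++ pvRepeatStr n s := by
  induction n with
  | zero => simp [pvRepeatStr]
  | succ k ih => simp [pvRepeatStr, String.append_assoc, ih]

-- A's result depends only on the length; prove A = B by strong induction on length.
theorem sub_aux (n : Nat) : ∀ (commands : List String), commands.length = n →
    sub_build_redstone_blocks commands = sub_build_redstone_blocks_alt commands := by
  induction n with
  | zero =>
    intro commands h
    rw [sub_build_redstone_blocks]
    simp [h, sub_build_redstone_blocks_alt, pvRepeatStr]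
  | succ k ih =>
    intro commands h
    rw [sub_build_redstone_blocks]
    have hlen : commands.dropLast.length = k := by
      simp [List.length_dropLast, h]
    have hrec := ih commands.dropLast hlen
    simp only [h, Nat.succ_pos, if_pos]
    rw [hrec]
    simp [sub_build_redstone_blocks_alt, hlen, h, pvRepeatStr]
    -- associativity/rearrangement of string appends
    simp [String.append_assoc]
    exact pvRepeatStr_comm k "}"

-- ===== VERDICT (by name: the statement is the Claim_ definition above) =====
theorem sub_build_redstone_blocks_spec : Claim_equal_sub_build_redstone_blocks := by
  intro commands _
  unfold Spec_sub_build_redstone_blocks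
  exact sub_aux commands.length commands rfl
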